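-- pv_equiv track=rewrite | github.com/chemrich/MCPymol | src/mcpymol/server.py | _parse_a3m
-- ===== SOURCE A (Python) =====
-- def _parse_a3m(a3m_text: str) -> list[list[str]]:
--     """Parse an A3M-format MSA into a list of aligned sequences.
--
--     A3M uses lowercase letters for insertions (relative to the query).
--     We strip insertions so every sequence aligns column-by-column with
--     the query.
--
--     Returns:
--         List of sequences, each a list of single-character residues
--         aligned to the query. The first entry is the query itself.
--     """
--     sequences = []
--     current = []
--     for line in a3m_text.splitlines():
--         if line.startswith(">"):
--             if current:
--                 # Strip lowercase (insertions) and join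
--                 seq = [ch for ch in "".join(current) if not ch.islower()]
--                 sequences.append(seq)
--             current = []
--         else:
--             current.append(line.strip())
--     if current:
--         seq = [ch for ch in "".join(current) if not ch.islower()]
--         sequences.append(seq)
--     return sequences
-- ===== SOURCE B (Python) =====
-- def _parse_a3m(a3m_text: str) -> list[list[str]]:
--     """Parse an A3M-format MSA, dropping lowercase insertion columns.
--
--     Scans the lines with two indices: headers are skipped, and each maximal
--     run of non-header lines is joined into one aligned sequence.
--     """
--     lines = a3m_text.splitlines()
--     sequences = []
--     i, n = 0, len(lines)
--     while i < n:
--         if lines[i].startswith(">"):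
--             i += 1
--         else:
--             j = i + 1
--             while j < n and not lines[j].startswith(">"):
--                 j += 1
--             joined = "".join(line.strip() for line in lines[i:j])
--             sequences.append([ch for ch in joined if not ch.islower()])
--             i = j
--     return sequences
-- ===== Notes on version B (the rewrite author's own statement) =====
-- stated objective: alternative
-- what changed: Replaced A's accumulate-and-flush state machine by a two-pointer run scanner: skip header lines, and for each maximal run of non-header lines join it into one sequence directly.
import Mathlib
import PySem

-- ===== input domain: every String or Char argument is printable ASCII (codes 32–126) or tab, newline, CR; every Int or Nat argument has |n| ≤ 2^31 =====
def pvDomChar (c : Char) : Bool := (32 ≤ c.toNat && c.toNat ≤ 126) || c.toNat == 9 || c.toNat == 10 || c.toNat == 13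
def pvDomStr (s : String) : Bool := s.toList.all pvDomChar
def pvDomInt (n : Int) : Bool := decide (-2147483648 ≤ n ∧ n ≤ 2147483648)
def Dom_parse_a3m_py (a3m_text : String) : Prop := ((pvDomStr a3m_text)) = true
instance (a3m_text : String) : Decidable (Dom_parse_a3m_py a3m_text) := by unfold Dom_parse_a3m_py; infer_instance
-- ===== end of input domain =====

-- B replaces A's accumulate-and-flush state machine by a two-pointer run scanner over
-- the lines: headers are skipped, each maximal run of non-header lines becomes one
-- sequence (objective: alternative decomposition; same asymptotic cost).

-- shared by both ports: both Pythons compute [ch for ch in "".join(…) if not ch.islower()]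
def pvSeq (cur : List String) : List String :=
  ((PySem.Str.join "" cur).toList.filter (fun c => !PySem.Chars.islower c)).map
    (fun c => String.ofList [c])

def pvKey (l : String) : Bool := PySem.Str.startswith l ">"

-- ===== PORT A =====
def pvStepA (st : List (List String) × List String) (line : String) :
    List (List String) × List String :=
  if pvKey line then
    (if st.2.isEmpty then st.1 else st.1 ++ [pvSeq st.2], [])
  else
    (st.1, st.2 ++ [PySem.Str.strip line])

def parse_a3m_py (a3m_text : String) : List (List String) :=
  let st := (PySem.Str.splitlines a3m_text).foldl pvStepA ([], [])
  if st.2.isEmpty then st.1 else st.1 ++ [pvSeq st.2]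

-- ===== PORT B =====
-- B's index loop, as the obvious recursion on the remaining lines: skip a header,
-- otherwise take the maximal non-header run (lines[i:j]) and continue at its end.
def pvScan : List String → List (List String)
  | [] => []
  | l :: ls =>
    if pvKey l then pvScan ls
    else
      pvSeq ((l :: ls.takeWhile (fun x => !pvKey x)).map (fun x => PySem.Str.strip x)) ::
        pvScan (ls.dropWhile (fun x => !pvKey x))
termination_by ls => ls.length
decreasing_by
  · simp
  · have := List.length_dropWhile_le (p := fun x => !pvKey x) (l := ls)
    simp; omega

def parse_a3m_py_alt (a3m_text : String) : List (List String) :=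
  pvScan (PySem.Str.splitlines a3m_text)

-- ===== PRECONDITION & SPEC =====
def Spec_parse_a3m_py (a3m_text : String) (out : List (List String)) : Prop := out = parse_a3m_py_alt a3m_text
instance (a3m_text : String) (out : List (List String)) : Decidable (Spec_parse_a3m_py a3m_text out) := by unfold Spec_parse_a3m_py; infer_instance

-- ===== CLAIM (what is proved, stated in full; the proofs are below) =====
def Claim_equal_parse_a3m_py : Prop := ∀ (a3m_text : String), Dom_parse_a3m_py a3m_text → Spec_parse_a3m_py a3m_text (parse_a3m_py a3m_text)

-- ===== LEMMAS AND PROOFS =====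

-- A's loop, written as a recursion on the line list (proof-only helper)
def pvG : List String → List String → List (List String)
  | cur, [] => if cur.isEmpty then [] else [pvSeq cur]
  | cur, l :: ls =>
    if pvKey l then (if cur.isEmpty then [] else [pvSeq cur]) ++ pvG [] ls
    else pvG (cur ++ [PySem.Str.strip l]) ls

lemma pvFoldA (lines : List String) : ∀ (seqs : List (List String)) (cur : List String),
    (let st := lines.foldl pvStepA (seqs, cur);
     if st.2.isEmpty then st.1 else st.1 ++ [pvSeq st.2]) = seqs ++ pvG cur lines := by
  induction lines with
  | nil => intro seqs cur; by_cases h : cur.isEmpty <;> simp [pvG, h]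
  | cons l ls ih =>
    intro seqs cur
    rw [List.foldl_cons]
    by_cases hk : pvKey l
    · by_cases hc : cur.isEmpty
      · have hs : pvStepA (seqs, cur) l = (seqs, []) := by simp [pvStepA, hk, hc]
        rw [hs, ih]
        simp [pvG, hk, hc]
      · have hs : pvStepA (seqs, cur) l = (seqs ++ [pvSeq cur], []) := by simp [pvStepA, hk, hc]
        rw [hs, ih]
        simp [pvG, hk, hc, List.append_assoc]
    · have hs : pvStepA (seqs, cur) l = (seqs, cur ++ [PySem.Str.strip l]) := by
        simp [pvStepA, hk]
      rw [hs, ih]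
      simp [pvG, hk]

lemma pvMain (ls : List String) :
    pvG [] ls = pvScan ls ∧
    ∀ cur : List String, ¬ cur.isEmpty →
      pvG cur ls =
        pvSeq (cur ++ (ls.takeWhile (fun x => !pvKey x)).map (fun x => PySem.Str.strip x)) ::
          pvScan (ls.dropWhile (fun x => !pvKey x)) := by
  induction ls with
  | nil =>
    refine ⟨by simp [pvG, pvScan], ?_⟩
    intro cur hc
    simp [pvG, pvScan, hc]
  | cons l ls ih =>
    obtain ⟨ih1, ih2⟩ := ih
    by_cases hk : pvKey l
    · constructor
      · simp [pvG, pvScan, hk, ih1]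
      · intro cur hc
        simp [pvG, pvScan, hk, hc, ih1]
    · have hk' : pvKey l = false := by simpa using hk
      have hne : ∀ cur : List String, ¬ (cur ++ [PySem.Str.strip l]).isEmpty := by
        intro cur; simp
      constructor
      · have := ih2 [PySem.Str.strip l] (by simp)
        simp only [pvG, hk', Bool.false_eq_true, if_false, List.nil_append] at this ⊢
        rw [this]
        simp [pvScan, hk']
      · intro cur hc
        have := ih2 (cur ++ [PySem.Str.strip l]) (hne cur)
        simp only [pvG, hk', Bool.false_eq_true, if_false] at this ⊢
        rw [this]
        simp [List.takeWhile, List.dropWhile, hk', List.append_assoc]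

-- ===== VERDICT (by name: the statement is the Claim_ definition above) =====
theorem parse_a3m_py_spec : Claim_equal_parse_a3m_py := by
  intro t _
  unfold Spec_parse_a3m_py parse_a3m_py parse_a3m_py_alt
  have := pvFoldA (PySem.Str.splitlines t) [] []
  simp only [List.nil_append] at this
  rw [this, (pvMain (PySem.Str.splitlines t)).1]
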